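-- pv_equiv track=rewrite | github.com/Megacinder/mds24 | md1_python_basic/assignment2.py | n5_expenses_on_snacks2
-- ===== SOURCE A (Python) =====
-- def n5_expenses_on_snacks2(li: list) -> int:
--     a = 0
--     b = 0
--
--     for i in li:
--         if i > a:
--             a = i
--             b = 1
--         else:
--             b += 1
--     return b
-- ===== SOURCE B (Python) =====
-- def n5_expenses_on_snacks2(li: list) -> int:
--     if not li:
--         return 0
--     m = max(li)
--     if m > 0:
--         return len(li) - li.index(m)
--     return len(li)
-- ===== Notes on version B (the rewrite author's own statement) =====
-- stated objective: simpler
-- what changed: Replaces the incremental running-max/counter loop with a direct computation: the answer is len(li) - index_of_first_global_max when max(li) > 0, else len(li) (or 0 for an empty list).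
import Mathlib
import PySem

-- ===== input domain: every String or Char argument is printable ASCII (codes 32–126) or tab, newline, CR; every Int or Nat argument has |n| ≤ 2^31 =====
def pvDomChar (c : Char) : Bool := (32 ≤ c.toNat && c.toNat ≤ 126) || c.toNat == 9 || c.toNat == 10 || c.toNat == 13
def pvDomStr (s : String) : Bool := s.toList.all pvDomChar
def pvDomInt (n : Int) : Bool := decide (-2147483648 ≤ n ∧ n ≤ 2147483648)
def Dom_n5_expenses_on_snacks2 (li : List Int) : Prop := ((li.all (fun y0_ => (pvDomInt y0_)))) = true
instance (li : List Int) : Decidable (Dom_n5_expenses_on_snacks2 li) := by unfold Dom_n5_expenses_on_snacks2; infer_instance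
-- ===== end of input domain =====

-- B replaces A's running-max/counter loop with max-then-first-index arithmetic (objective: simpler).

-- ===== PORT A =====
-- literal port of A's loop: state (a, b), reset b to 1 on a new maximum, else increment
def n5_expenses_on_snacks2 (li : List Int) : Int :=
  (li.foldl (fun ab i => if i > ab.1 then (i, 1) else (ab.1, ab.2 + 1)) ((0 : Int), (0 : Int))).2

-- ===== PORT B =====
-- literal port of Source B: empty → 0; m = max(li); m > 0 → len - li.index(m); else len
def n5_expenses_on_snacks2_alt (li : List Int) : Int :=
  if li = [] then 0
  else
    match PySem.List.max? li (fun x => x) with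
    | none => 0
    | some m =>
      if m > 0 then (li.length : Int) - (((PySem.List.index? li m).getD 0 : Nat) : Int)
      else (li.length : Int)

-- ===== PRECONDITION & SPEC =====
def Spec_n5_expenses_on_snacks2 (li : List Int) (out : Int) : Prop := out = n5_expenses_on_snacks2_alt li
instance (li : List Int) (out : Int) : Decidable (Spec_n5_expenses_on_snacks2 li out) := by unfold Spec_n5_expenses_on_snacks2; infer_instance

-- ===== CLAIM (what is proved, stated in full; the proofs are below) =====
def Claim_equal_n5_expenses_on_snacks2 : Prop := ∀ (li : List Int), Dom_n5_expenses_on_snacks2 li → Spec_n5_expenses_on_snacks2 li (n5_expenses_on_snacks2 li)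

-- ===== LEMMAS AND PROOFS =====

theorem foldl_max_comm (l : List Int) : ∀ x y : Int, l.foldl max (max x y) = max x (l.foldl max y) := by
  induction l with
  | nil => intro x y; simp
  | cons z t ih =>
    intro x y
    simp only [List.foldl_cons]
    rw [max_assoc, ih]

-- the fold's counter from state (a, b): if some element exceeds a, it is
-- length - (first index of the running maximum); otherwise b + length
theorem fold_spec (t : List Int) : ∀ (x a b : Int),
    (((x :: t).foldl (fun ab i => if i > ab.1 then (i, 1) else (ab.1, ab.2 + 1)) (a, b)).2 : Int) =
      (if a < t.foldl max x
        then ((x :: t).length : Int) - (((PySem.List.index? (x :: t) (t.foldl max x)).getD 0 : Nat) : Int)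
        else b + ((x :: t).length : Int)) := by
  induction t with
  | nil =>
    intro x a b
    by_cases h : a < x
    · simp [h]
    · simp [h]
  | cons y ys ih =>
    intro x a b
    have hMcons : (y :: ys).foldl max x = ys.foldl max (max x y) := by simp
    have hM' : ys.foldl max (max x y) = max x (ys.foldl max y) := foldl_max_comm ys x y
    have hmem : ys.foldl max y ∈ (y :: ys) := by
      have h1 : PySem.List.max? (y :: ys) (fun v => v) = some (ys.foldl max y) :=
        PySem.List.max?_id_cons _ _
      exact PySem.List.max?_mem h1
    by_cases hx : a < x
    · -- reset: state becomes (x, 1)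
      have hstep : ((x :: y :: ys).foldl (fun ab i => if i > ab.1 then (i, 1) else (ab.1, ab.2 + 1)) (a, b))
          = ((y :: ys).foldl (fun ab i => if i > ab.1 then (i, 1) else (ab.1, ab.2 + 1)) (x, 1)) := by
        simp [hx]
      rw [hstep, ih y x 1]
      by_cases hxm : x < ys.foldl max y
      · -- tail max wins
        have hMeq : (y :: ys).foldl max x = ys.foldl max y := by
          rw [hMcons, hM']; omega
        have hne : x ≠ ys.foldl max y := by omega
        have hidx : PySem.List.index? (x :: y :: ys) (ys.foldl max y)
            = (PySem.List.index? (y :: ys) (ys.foldl max y)).map (· + 1) :=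
          PySem.List.index?_cons_of_ne _ hne
        obtain ⟨k, hk⟩ : ∃ k, PySem.List.index? (y :: ys) (ys.foldl max y) = some k := by
          have := (PySem.List.index?_isSome_iff (xs := y :: ys) (v := ys.foldl max y)).2 hmem
          exact Option.isSome_iff_exists.mp this
        have hxm' : a < (y :: ys).foldl max x := by rw [hMeq]; omega
        simp only [hMeq, hxm, hidx, hk, Option.map_some, Option.getD_some]
        simp
        omega
      · -- head x is the (new) maximum
        have hMeq : (y :: ys).foldl max x = x := by
          rw [hMcons, hM']; omega
        have hxa : a < (y :: ys).foldl max x := by omega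
        simp only [hxm, hMeq, PySem.List.index?_cons_self]
        simp [hx]
        omega
    · -- no reset: state becomes (a, b + 1)
      have hstep : ((x :: y :: ys).foldl (fun ab i => if i > ab.1 then (i, 1) else (ab.1, ab.2 + 1)) (a, b))
          = ((y :: ys).foldl (fun ab i => if i > ab.1 then (i, 1) else (ab.1, ab.2 + 1)) (a, b + 1)) := by
        simp [hx]
      rw [hstep, ih y a (b + 1)]
      by_cases ham : a < ys.foldl max y
      · have hMeq : (y :: ys).foldl max x = ys.foldl max y := by
          rw [hMcons, hM']; omega
        have hne : x ≠ ys.foldl max y := by omega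
        have hidx : PySem.List.index? (x :: y :: ys) (ys.foldl max y)
            = (PySem.List.index? (y :: ys) (ys.foldl max y)).map (· + 1) :=
          PySem.List.index?_cons_of_ne _ hne
        obtain ⟨k, hk⟩ : ∃ k, PySem.List.index? (y :: ys) (ys.foldl max y) = some k := by
          have := (PySem.List.index?_isSome_iff (xs := y :: ys) (v := ys.foldl max y)).2 hmem
          exact Option.isSome_iff_exists.mp this
        simp only [hMeq, if_pos ham, hidx, hk, Option.map_some, Option.getD_some]
        simp
      · have hMle : ¬ a < (y :: ys).foldl max x := by
          rw [hMcons, hM']; omega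
        simp only [if_neg ham, if_neg hMle]
        simp
        omega

-- ===== VERDICT (by name: the statement is the Claim_ definition above) =====
theorem n5_expenses_on_snacks2_spec : Claim_equal_n5_expenses_on_snacks2 := by
  intro li _
  unfold Spec_n5_expenses_on_snacks2 n5_expenses_on_snacks2 n5_expenses_on_snacks2_alt
  cases li with
  | nil => simp
  | cons x t =>
    have hmax : PySem.List.max? (x :: t) (fun v => v) = some (t.foldl max x) :=
      PySem.List.max?_id_cons _ _
    rw [fold_spec t x 0 0]
    simp only [hmax, if_neg (by simp : ¬ x :: t = [])]
    by_cases h : (0 : Int) < t.foldl max x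
    · simp [h]
    · simp [h]
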